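-- pv_equiv track=rewrite | github.com/Barox10/predict-roulette-liveNEW | main.py | _get_block_ids_for_number
-- ===== SOURCE A (Python) =====
-- def _get_block_ids_for_number(number, roulette_wheel_sequence, block_size=5):
--     """
--     Dato un numero, restituisce una lista degli ID di tutti i blocchi contigui di `block_size`
--     sulla ruota della roulette che contengono questo numero.
--     L'ID del blocco 'i' corrisponde al blocco che inizia a roulette_wheel_sequence[i].
--     """
--     block_ids = []
--     wheel_len = len(roulette_wheel_sequence)
--
--     # Itera su tutte le possibili posizioni di inizio blocco sulla ruota
--     for block_id in range(wheel_len):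
--         # Costruisci il blocco corrente (avvolgendo se necessario)
--         current_block = []
--         for i in range(block_size):
--             current_block.append(roulette_wheel_sequence[(block_id + i) % wheel_len])
--
--         # Se il numero è in questo blocco, aggiungi il suo block_id
--         if number in current_block:
--             block_ids.append(block_id)
--     return block_ids
-- ===== SOURCE B (Python) =====
-- def _get_block_ids_for_number(number, roulette_wheel_sequence, block_size=5):
--     n = len(roulette_wheel_sequence)
--     k = min(block_size, n)
--     ids = set()
--     for p, v in enumerate(roulette_wheel_sequence):
--         if v == number:
--             for i in range(k):
--                 ids.add((p - i) % n)
--     return sorted(ids)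
-- ===== Notes on version B (the rewrite author's own statement) =====
-- stated objective: faster
-- what changed: Instead of materialising every wrap-around block and scanning it for the number, B finds the number's positions p and marks the block ids (p-i) % n for i < min(block_size, n) in a set, then returns them sorted.
import Mathlib
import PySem

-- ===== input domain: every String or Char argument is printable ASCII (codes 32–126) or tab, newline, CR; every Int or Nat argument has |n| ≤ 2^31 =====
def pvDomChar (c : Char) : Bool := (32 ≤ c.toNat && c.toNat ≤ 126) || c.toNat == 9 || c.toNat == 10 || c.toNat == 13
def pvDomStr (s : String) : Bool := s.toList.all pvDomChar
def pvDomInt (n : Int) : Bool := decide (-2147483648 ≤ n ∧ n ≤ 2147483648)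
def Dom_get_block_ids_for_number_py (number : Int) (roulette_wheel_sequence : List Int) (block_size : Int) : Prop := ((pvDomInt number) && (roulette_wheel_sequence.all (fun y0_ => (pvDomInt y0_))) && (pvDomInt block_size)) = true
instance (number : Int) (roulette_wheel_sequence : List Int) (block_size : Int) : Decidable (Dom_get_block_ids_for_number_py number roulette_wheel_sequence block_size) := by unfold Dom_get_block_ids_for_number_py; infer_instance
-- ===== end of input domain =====

-- ===== PORT A =====
-- Literal port of A: for each block_id, build the wrap-around block of block_size
-- elements, then test membership. The index (block_id + i) % wheel_len is always in
-- range when the loop body runs (wheel_len > 0 there), so pyGetD's default 0 is never used.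
def get_block_ids_for_number_py (number : Int) (roulette_wheel_sequence : List Int) (block_size : Int) : List Int :=
  let wheel_len : Int := roulette_wheel_sequence.length
  (PySem.List.pyRange 0 wheel_len 1).foldl (fun block_ids block_id =>
    let current_block : List Int :=
      (PySem.List.pyRange 0 block_size 1).foldl
        (fun cb i => cb ++ [PySem.List.pyGetD roulette_wheel_sequence (PySem.Int.mod (block_id + i) wheel_len) 0]) []
    if number ∈ current_block then block_ids ++ [block_id] else block_ids) []

-- ===== PORT B =====
-- B (one honest line): find the number's positions p, mark ids (p - i) % n for
-- i < min(block_size, n) in a set, return them sorted — asymptotically faster than A.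
def get_block_ids_for_number_py_alt (number : Int) (roulette_wheel_sequence : List Int) (block_size : Int) : List Int :=
  let n : Int := roulette_wheel_sequence.length
  let k : Int := min block_size n
  let ids : PySem.Set Int :=
    (PySem.List.enumerate roulette_wheel_sequence 0).foldl (fun s pv =>
      if pv.2 = number then
        (PySem.List.pyRange 0 k 1).foldl (fun s i => PySem.Set.add s (PySem.Int.mod (pv.1 - i) n)) s
      else s) PySem.Set.empty
  PySem.List.sorted ids (fun x => x) false

-- ===== PRECONDITION & SPEC =====
def Spec_get_block_ids_for_number_py (number : Int) (roulette_wheel_sequence : List Int) (block_size : Int) (out : List Int) : Prop := out = get_block_ids_for_number_py_alt number roulette_wheel_sequence block_size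
instance (number : Int) (roulette_wheel_sequence : List Int) (block_size : Int) (out : List Int) : Decidable (Spec_get_block_ids_for_number_py number roulette_wheel_sequence block_size out) := by unfold Spec_get_block_ids_for_number_py; infer_instance

-- ===== CLAIM (what is proved, stated in full; the proofs are below) =====
def Claim_equal_get_block_ids_for_number_py : Prop := ∀ (number : Int) (roulette_wheel_sequence : List Int) (block_size : Int), Dom_get_block_ids_for_number_py number roulette_wheel_sequence block_size → Spec_get_block_ids_for_number_py number roulette_wheel_sequence block_size (get_block_ids_for_number_py number roulette_wheel_sequence block_size)

-- ===== LEMMAS AND PROOFS =====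

-- A set built by a loop of adds stays duplicate-free.
theorem pv_nodup_foldl_add (l : List Int) (f : Int → Int) (s : PySem.Set Int) (hs : s.Nodup) :
    (l.foldl (fun s i => PySem.Set.add s (f i)) s).Nodup := by
  induction l generalizing s with
  | nil => exact hs
  | cons x xs ih => exact ih _ (PySem.Set.nodup_add s (f x) hs)

-- Membership in the set built by B's nested loops.
theorem pv_mem_outer (number n k : Int) (l : List (Int × Int)) (s : PySem.Set Int) (y : Int) :
    (y ∈ l.foldl (fun s pv => if pv.2 = number then
        (PySem.List.pyRange 0 k 1).foldl (fun s i => PySem.Set.add s (PySem.Int.mod (pv.1 - i) n)) s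
      else s) s)
    ↔ y ∈ s ∨ ∃ p ∈ l, p.2 = number ∧ ∃ i ∈ PySem.List.pyRange 0 k 1, y = PySem.Int.mod (p.1 - i) n := by
  induction l generalizing s with
  | nil => simp
  | cons x xs ih =>
    simp only [List.foldl_cons]
    by_cases hx : x.2 = number
    · rw [if_pos hx, ih, PySem.Set.mem_foldl_add]
      constructor
      · rintro (⟨hy | ⟨i, hi, hyi⟩⟩ | ⟨p, hp, h2, i, hi, hyi⟩)
        · exact Or.inl hy
        · exact Or.inr ⟨x, List.mem_cons_self, hx, i, hi, hyi⟩
        · exact Or.inr ⟨p, List.mem_cons_of_mem _ hp, h2, i, hi, hyi⟩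
      · rintro (hy | ⟨p, hp, h2, i, hi, hyi⟩)
        · exact Or.inl (Or.inl hy)
        · rcases List.mem_cons.mp hp with rfl | hp'
          · exact Or.inl (Or.inr ⟨i, hi, hyi⟩)
          · exact Or.inr ⟨p, hp', h2, i, hi, hyi⟩
    · rw [if_neg hx, ih]
      constructor
      · rintro (hy | ⟨p, hp, h2, i, hi, hyi⟩)
        · exact Or.inl hy
        · exact Or.inr ⟨p, List.mem_cons_of_mem _ hp, h2, i, hi, hyi⟩
      · rintro (hy | ⟨p, hp, h2, i, hi, hyi⟩)
        · exact Or.inl hy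
        · rcases List.mem_cons.mp hp with rfl | hp'
          · exact absurd h2 hx
          · exact Or.inr ⟨p, hp', h2, i, hi, hyi⟩

-- The set built by B's nested loops is duplicate-free.
theorem pv_nodup_outer (number n k : Int) (l : List (Int × Int)) (s : PySem.Set Int) (hs : s.Nodup) :
    (l.foldl (fun s pv => if pv.2 = number then
        (PySem.List.pyRange 0 k 1).foldl (fun s i => PySem.Set.add s (PySem.Int.mod (pv.1 - i) n)) s
      else s) s).Nodup := by
  induction l generalizing s with
  | nil => exact hs
  | cons x xs ih =>
    simp only [List.foldl_cons]
    by_cases hx : x.2 = number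
    · rw [if_pos hx]; exact ih _ (pv_nodup_foldl_add _ _ s hs)
    · rw [if_neg hx]; exact ih _ hs

-- The heart of the equivalence: a block id j contains the number (A's test) iff
-- j = (p - i) % n for some position p of the number and some offset i < min(block_size, n).
theorem pv_key (number : Int) (seq : List Int) (bs j : Int) :
    (j ∈ PySem.List.pyRange 0 (seq.length : Int) 1 ∧
      number ∈ (PySem.List.pyRange 0 bs 1).map
        (fun i => PySem.List.pyGetD seq (PySem.Int.mod (j + i) (seq.length : Int)) 0))
    ↔ ∃ p ∈ PySem.List.enumerate seq 0, p.2 = number ∧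
        ∃ i ∈ PySem.List.pyRange 0 (min bs (seq.length : Int)) 1,
          j = PySem.Int.mod (p.1 - i) (seq.length : Int) := by
  constructor
  · rintro ⟨hj, hmem⟩
    rw [PySem.List.mem_pyRange_one] at hj
    have hn : (0:Int) < (seq.length : Int) := by omega
    rcases List.mem_map.mp hmem with ⟨i, hi, hval⟩
    rw [PySem.List.mem_pyRange_one] at hi
    rw [PySem.Int.mod_eq_emod_of_pos hn] at hval
    set q : Int := (j + i) % (seq.length : Int) with hqdef
    have hq0 : 0 ≤ q := Int.emod_nonneg _ (by omega)
    have hq1 : q < (seq.length : Int) := Int.emod_lt_of_pos _ hn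
    have hqlt : q.toNat < seq.length := by omega
    refine ⟨(q, seq[q.toNat]), ?_, ?_, ?_⟩
    · rw [PySem.List.mem_enumerate_iff]
      exact ⟨q.toNat, hqlt, by simp; omega⟩
    · show seq[q.toNat] = number
      rw [PySem.List.pyGetD_of_nonneg seq 0 hq0, List.getD_eq_getElem _ _ hqlt] at hval
      exact hval
    · refine ⟨i % (seq.length : Int), ?_, ?_⟩
      · rw [PySem.List.mem_pyRange_one]
        have h0 : 0 ≤ i % (seq.length : Int) := Int.emod_nonneg _ (by omega)
        have h1 : i % (seq.length : Int) < (seq.length : Int) := Int.emod_lt_of_pos _ hn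
        have h2 : i % (seq.length : Int) ≤ i := by
          have heq := Int.emod_add_mul_ediv i (seq.length : Int)
          have hpos : 0 ≤ (seq.length : Int) * (i / (seq.length : Int)) :=
            mul_nonneg (by omega) (Int.ediv_nonneg hi.1 (by omega))
          linarith
        constructor
        · exact h0
        · omega
      · rw [PySem.Int.mod_eq_emod_of_pos hn]
        have : (q - i % (seq.length : Int)) % (seq.length : Int)
            = ((j + i) - i) % (seq.length : Int) := by
          rw [hqdef, ← Int.sub_emod]
        rw [this]
        simp only [add_sub_cancel_right]
        rw [Int.emod_eq_of_lt hj.1 hj.2]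
  · rintro ⟨p, hp, h2, i, hi, rfl⟩
    rw [PySem.List.mem_enumerate_iff] at hp
    rcases hp with ⟨m, hm, rfl⟩
    rw [PySem.List.mem_pyRange_one] at hi
    have hn : (0:Int) < (seq.length : Int) := by omega
    rw [PySem.Int.mod_eq_emod_of_pos hn]
    have hj0 : 0 ≤ ((0 + (m:Int)) - i) % (seq.length : Int) := Int.emod_nonneg _ (by omega)
    have hj1 : ((0 + (m:Int)) - i) % (seq.length : Int) < (seq.length : Int) := Int.emod_lt_of_pos _ hn
    constructor
    · rw [PySem.List.mem_pyRange_one]; exact ⟨hj0, hj1⟩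
    · refine List.mem_map.mpr ⟨i, ?_, ?_⟩
      · rw [PySem.List.mem_pyRange_one]; exact ⟨hi.1, by omega⟩
      · rw [PySem.Int.mod_eq_emod_of_pos hn]
        have : (((0 + (m:Int)) - i) % (seq.length : Int) + i) % (seq.length : Int)
            = (m:Int) := by
          conv_lhs => rw [Int.add_emod, Int.emod_emod_of_dvd _ dvd_rfl, ← Int.add_emod]
          simp only [sub_add_cancel, zero_add]
          exact Int.emod_eq_of_lt (by omega) (by omega)
        rw [this]
        rw [PySem.List.pyGetD_natCast, List.getD_eq_getElem _ _ hm]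
        exact h2

-- ===== VERDICT (by name: the statement is the Claim_ definition above) =====
theorem get_block_ids_for_number_py_spec : Claim_equal_get_block_ids_for_number_py := by
  intro number seq bs _
  unfold Spec_get_block_ids_for_number_py
  unfold get_block_ids_for_number_py get_block_ids_for_number_py_alt
  simp only []
  -- A's outer loop is a filter of the range; its inner loop builds the block by map
  rw [show (fun (block_ids : List Int) (block_id : Int) =>
        let current_block : List Int :=
          (PySem.List.pyRange 0 bs 1).foldl
            (fun cb i => cb ++ [PySem.List.pyGetD seq (PySem.Int.mod (block_id + i) (seq.length : Int)) 0]) []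
        if number ∈ current_block then block_ids ++ [block_id] else block_ids) = (fun block_ids block_id =>
        if number ∈ (PySem.List.pyRange 0 bs 1).map
            (fun i => PySem.List.pyGetD seq (PySem.Int.mod (block_id + i) (seq.length : Int)) 0)
          then block_ids ++ [block_id] else block_ids) from by
      funext acc j
      rw [PySem.List.foldl_append_singleton_eq_map
        (fun i => PySem.List.pyGetD seq (PySem.Int.mod (j + i) (seq.length : Int)) 0)
        (PySem.List.pyRange 0 bs 1) [], List.nil_append]]
  rw [PySem.List.foldl_append_ite_eq_filter, List.nil_append]
  symm
  apply PySem.List.sorted_eq_of_perm_of_pairwise_lt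
  · -- the filtered range is a permutation of B's set: both Nodup, same members
    apply (List.perm_ext_iff_of_nodup ?_ ?_).mpr
    · intro j
      rw [List.mem_filter, decide_eq_true_eq,
        pv_mem_outer number (seq.length : Int) (min bs (seq.length : Int)), pv_key]
      simp [PySem.Set.empty]
    · exact (PySem.List.nodup_pyRange_one 0 _).filter _
    · exact pv_nodup_outer _ _ _ _ _ List.nodup_nil
  · exact List.Pairwise.filter _ (PySem.List.pairwise_lt_pyRange_one 0 _)
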